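-- pv_equiv track=rewrite | github.com/snowheapllc/StruktX | strukt/examples/time_handler.py | _city_to_tz
-- ===== SOURCE A (Python) =====
-- from typing import List, Optional
--
-- def _city_to_tz(text: str) -> Optional[str]:
--     # Minimal common city mapping; can be extended/configured
--     city_map = {
--         "beirut": "Asia/Beirut",
--         "dubai": "Asia/Dubai",
--         "abu dhabi": "Asia/Dubai",
--         "tokyo": "Asia/Tokyo",
--         "london": "Europe/London",
--         "paris": "Europe/Paris",
--         "berlin": "Europe/Berlin",
--         "amsterdam": "Europe/Amsterdam",
--         "new york": "America/New_York",
--         "los angeles": "America/Los_Angeles",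
--         "san francisco": "America/Los_Angeles",
--         "chicago": "America/Chicago",
--         "sydney": "Australia/Sydney",
--         "melbourne": "Australia/Melbourne",
--         "singapore": "Asia/Singapore",
--         "hong kong": "Asia/Hong_Kong",
--         "mumbai": "Asia/Kolkata",
--         "delhi": "Asia/Kolkata",
--         "shanghai": "Asia/Shanghai",
--     }
--     lowered = text.lower()
--     # Check multi-word keys first
--     for city in sorted(city_map.keys(), key=lambda s: -len(s)):
--         if city in lowered:
--             return city_map[city]
--     return None
-- ===== SOURCE B (Python) =====
-- from typing import Optional
--
-- def _city_to_tz(text: str) -> Optional[str]: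
--     # One linear pass over the map in insertion order, keeping the longest match;
--     # strict '>' makes the earliest-inserted key win among equal-length matches,
--     # exactly as A's stable descending-length sort does.
--     city_map = {
--         "beirut": "Asia/Beirut",
--         "dubai": "Asia/Dubai",
--         "abu dhabi": "Asia/Dubai",
--         "tokyo": "Asia/Tokyo",
--         "london": "Europe/London",
--         "paris": "Europe/Paris",
--         "berlin": "Europe/Berlin",
--         "amsterdam": "Europe/Amsterdam",
--         "new york": "America/New_York",
--         "los angeles": "America/Los_Angeles",
--         "san francisco": "America/Los_Angeles",
--         "chicago": "America/Chicago",
--         "sydney": "Australia/Sydney",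
--         "melbourne": "Australia/Melbourne",
--         "singapore": "Asia/Singapore",
--         "hong kong": "Asia/Hong_Kong",
--         "mumbai": "Asia/Kolkata",
--         "delhi": "Asia/Kolkata",
--         "shanghai": "Asia/Shanghai",
--     }
--     lowered = text.lower()
--     best = None
--     for city in city_map:
--         if city in lowered and (best is None or len(city) > len(best)):
--             best = city
--     return city_map[best] if best is not None else None
-- ===== Notes on version B (the rewrite author's own statement) =====
-- stated objective: simpler
-- what changed: Replaced the sort-keys-by-descending-length-then-return-first-substring-match loop with a single linear pass over the map in insertion order that keeps the longest matching key (strict '>' preserves A's tie-breaking), removing the sort entirely.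
import Mathlib
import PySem

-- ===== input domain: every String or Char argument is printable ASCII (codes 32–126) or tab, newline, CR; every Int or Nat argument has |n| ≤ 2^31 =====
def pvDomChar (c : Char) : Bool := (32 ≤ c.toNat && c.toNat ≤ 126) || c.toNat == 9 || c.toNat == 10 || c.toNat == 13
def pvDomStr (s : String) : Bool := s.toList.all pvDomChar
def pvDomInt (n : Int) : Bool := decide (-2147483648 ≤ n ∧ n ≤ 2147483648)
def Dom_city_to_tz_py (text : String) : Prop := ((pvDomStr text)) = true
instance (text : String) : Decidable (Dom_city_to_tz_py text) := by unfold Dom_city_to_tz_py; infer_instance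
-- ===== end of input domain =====

-- B replaces A's sort-by-descending-length + first-match early return with a single
-- linear pass over the map in insertion order that keeps the longest match (objective: simpler).

-- ===== PORT A =====
-- the literal city_map dict (shared data, used by both ports)
def cityMap : PySem.Dict String String := PySem.Dict.mk
  [ ("beirut", "Asia/Beirut"),
    ("dubai", "Asia/Dubai"),
    ("abu dhabi", "Asia/Dubai"),
    ("tokyo", "Asia/Tokyo"),
    ("london", "Europe/London"),
    ("paris", "Europe/Paris"),
    ("berlin", "Europe/Berlin"),
    ("amsterdam", "Europe/Amsterdam"),
    ("new york", "America/New_York"),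
    ("los angeles", "America/Los_Angeles"),
    ("san francisco", "America/Los_Angeles"),
    ("chicago", "America/Chicago"),
    ("sydney", "Australia/Sydney"),
    ("melbourne", "Australia/Melbourne"),
    ("singapore", "Asia/Singapore"),
    ("hong kong", "Asia/Hong_Kong"),
    ("mumbai", "Asia/Kolkata"),
    ("delhi", "Asia/Kolkata"),
    ("shanghai", "Asia/Shanghai") ]

-- A's 'for city in sorted(...): if city in lowered: return city_map[city]' loop
def cityLoopA (lowered : String) : List String → Option String
  | [] => none
  | city :: rest =>
    if PySem.Str.isIn city lowered then PySem.Dict.get? cityMap city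
    else cityLoopA lowered rest

def city_to_tz_py (text : String) : Option String :=
  let lowered := PySem.Str.lower text
  cityLoopA lowered
    (PySem.List.sorted (PySem.Dict.keys cityMap) (fun s => -(PySem.Str.len s)))

-- ===== PORT B =====
-- B's loop body: update 'best' when city matches and is strictly longer than the current best
def stepB (m : String → Bool) (best : Option String) (city : String) : Option String :=
  if m city &&
      (match best with
       | none => true
       | some b => decide (PySem.Str.len b < PySem.Str.len city))
  then some city else best

def city_to_tz_py_alt (text : String) : Option String :=
  let lowered := PySem.Str.lower text
  let best := (PySem.Dict.keys cityMap).foldl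
    (stepB (fun city => PySem.Str.isIn city lowered)) none
  match best with
  | some b => PySem.Dict.get? cityMap b
  | none => none

-- ===== PRECONDITION & SPEC =====
def Spec_city_to_tz_py (text : String) (out : Option String) : Prop := out = city_to_tz_py_alt text
instance (text : String) (out : Option String) : Decidable (Spec_city_to_tz_py text out) := by unfold Spec_city_to_tz_py; infer_instance

-- ===== CLAIM (what is proved, stated in full; the proofs are below) =====
def Claim_equal_city_to_tz_py : Prop := ∀ (text : String), Dom_city_to_tz_py text → Spec_city_to_tz_py text (city_to_tz_py text)

-- ===== LEMMAS AND PROOFS =====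

-- A's loop is find?-then-lookup
lemma cityLoopA_eq_find? (s : String) (l : List String) :
    cityLoopA s l
      = (l.find? (fun c => PySem.Str.isIn c s)).bind (fun c => PySem.Dict.get? cityMap c) := by
  induction l with
  | nil => simp [cityLoopA]
  | cons c rest ih =>
    rw [cityLoopA]
    cases h : PySem.Str.isIn c s <;>
      simp [List.find?, - PySem.Str.isIn_eq, h, ih]

-- first match after inserting x into a descending-by-length list = one step of B's fold
lemma find?_insertBy (m : String → Bool) (x : String) (S : List String)
    (hS : S.Pairwise (fun a b => -(PySem.Str.len a) ≤ -(PySem.Str.len b))) :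
    (PySem.List.insertBy
        (fun a b => decide (-(PySem.Str.len a) < -(PySem.Str.len b))) x S).find? m
      = stepB m (S.find? m) x := by
  induction S with
  | nil =>
    cases hmx : m x <;> simp [PySem.List.insertBy, stepB, List.find?, hmx]
  | cons y ys ih =>
    have hpair := (List.pairwise_cons.mp hS).1
    have htail := (List.pairwise_cons.mp hS).2
    by_cases hxy : -(PySem.Str.len x) < -(PySem.Str.len y)
    · -- x is strictly longer than y: inserted right here
      simp only [PySem.List.insertBy]
      rw [if_pos (by simpa using hxy)]
      cases hfind : List.find? m (y :: ys) with
      | none =>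
        cases hmx : m x with
        | true => rw [List.find?_cons_of_pos hmx]; simp [stepB, hmx]
        | false => rw [List.find?_cons_of_neg (by simp [hmx]), hfind]; simp [stepB, hmx]
      | some r =>
        have hyr : -(PySem.Str.len y) ≤ -(PySem.Str.len r) := by
          rcases List.mem_cons.mp (List.mem_of_find?_eq_some hfind) with h | h
          · simp [h]
          · exact hpair r h
        have hrx : PySem.Str.len r < PySem.Str.len x := by omega
        have hrxN : r.length < x.length := by
          simpa [PySem.Str.len] using hrx
        cases hmx : m x with
        | true => rw [List.find?_cons_of_pos hmx]; simp [stepB, hmx, hrxN]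
        | false => rw [List.find?_cons_of_neg (by simp [hmx]), hfind]; simp [stepB, hmx]
    · -- y is at least as long as x: x is inserted further right
      simp only [PySem.List.insertBy]
      rw [if_neg (by simpa using hxy)]
      simp only [List.find?]
      cases hmy : m y with
      | true =>
        have hyx : ¬ PySem.Str.len y < PySem.Str.len x := by omega
        have hyxN : ¬ y.length < x.length := by
          simpa [PySem.Str.len] using hyx
        simp [stepB, hyxN]
      | false =>
        exact ih htail

-- B's whole fold computes the first match of the descending-length sort
lemma fold_eq_find (m : String → Bool) (l : List String) :
    l.foldl (stepB m) none
      = (PySem.List.sorted l (fun s => -(PySem.Str.len s))).find? m := by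
  induction l using List.reverseRecOn with
  | nil => simp [PySem.List.sorted_eq_foldl_insertBy]
  | append_singleton l x ih =>
    have hsorted : PySem.List.sorted (l ++ [x]) (fun s => -(PySem.Str.len s))
        = PySem.List.insertBy
            (fun a b => decide (-(PySem.Str.len a) < -(PySem.Str.len b))) x
            (PySem.List.sorted l (fun s => -(PySem.Str.len s))) := by
      rw [PySem.List.sorted_eq_foldl_insertBy, PySem.List.sorted_eq_foldl_insertBy,
        List.foldl_append]
      simp
    rw [List.foldl_append, hsorted,
      find?_insertBy m x _ (PySem.List.sorted_pairwise l (fun s => -(PySem.Str.len s))),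
      ih]
    simp

-- ===== VERDICT (by name: the statement is the Claim_ definition above) =====
theorem city_to_tz_py_spec : Claim_equal_city_to_tz_py := by
  intro text _
  show city_to_tz_py text = city_to_tz_py_alt text
  simp only [city_to_tz_py, city_to_tz_py_alt]
  rw [cityLoopA_eq_find?, fold_eq_find]
  cases (PySem.List.sorted (PySem.Dict.keys cityMap)
      (fun s => -(PySem.Str.len s))).find? (fun c => PySem.Str.isIn c (PySem.Str.lower text)) <;>
    rfl
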